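-- pv_equiv track=rewrite | github.com/v-t-9/PythonPuzzles | ex60.py | adjacent_to_prime
-- ===== SOURCE A (Python) =====
-- def Prime(l):
--     res = []
--     for i in l:
--         c = 0
--         for j in range(1,i):
--             if i %j == 0:
--                 c = c +1
--         if c == 1:
--             res.append(True)
--         else:
--             res.append(False)
--     return res
--
-- def adjacent_to_prime(l):
--     p = Prime(l)
--     res = []
--     mi_pos = []
--     ma_pos = []
--     for i in range(len(p)):
--         if p[i] == True:
--             if i > 0:
--                 mi_pos.append(i-1)
--             ma_pos.append(i+1)
--
--     for i in range(len(l)):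
--         if i in mi_pos:
--             res.append(l[i])
--         if i in ma_pos:
--             res.append(l[i])
--
--     res1 = set(res)
--     res = list(res1)
--     res.sort()
--     return res
-- ===== SOURCE B (Python) =====
-- def adjacent_to_prime(l):
--     def is_prime(n):
--         if n < 2:
--             return False
--         for j in range(2, n):
--             if j * j > n:
--                 break
--             if n % j == 0:
--                 return False
--         return True
--
--     vals = set()
--     for i in range(len(l)):
--         if is_prime(l[i]):
--             if i > 0:
--                 vals.add(l[i - 1])
--             if i + 1 < len(l):
--                 vals.add(l[i + 1])
--     return sorted(vals)
-- ===== Notes on version B (the rewrite author's own statement) =====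
-- stated objective: faster
-- what changed: Replaces the count-all-divisors primality test and the quadratic index-membership pass (i in mi_pos/ma_pos list scans) by a sqrt-bounded trial division and a single pass that adds each prime's neighbours directly to a set.
import Mathlib
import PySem

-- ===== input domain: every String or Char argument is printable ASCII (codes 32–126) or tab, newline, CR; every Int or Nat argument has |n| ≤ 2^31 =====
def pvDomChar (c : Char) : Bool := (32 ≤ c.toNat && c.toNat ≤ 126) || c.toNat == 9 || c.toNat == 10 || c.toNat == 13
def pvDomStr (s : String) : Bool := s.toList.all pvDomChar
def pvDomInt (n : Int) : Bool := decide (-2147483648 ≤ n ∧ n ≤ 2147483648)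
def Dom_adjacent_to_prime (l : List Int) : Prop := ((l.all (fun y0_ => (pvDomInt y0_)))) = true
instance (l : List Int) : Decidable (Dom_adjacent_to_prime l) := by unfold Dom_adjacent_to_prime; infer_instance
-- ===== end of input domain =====

-- B replaces A's count-all-divisors primality test and quadratic index-membership pass
-- by a sqrt-bounded trial division and one set-building pass over the list (objective: faster).


-- ===== PORT A =====
-- inner loop of Prime: c = number of j in range(1, i) with i % j == 0
def pvCountA (i : Int) : Int :=
  (PySem.List.pyRange 1 i 1).foldl (fun c j => if PySem.Int.mod i j = 0 then c + 1 else c) 0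

-- Prime(l): list of booleans, appended element by element
def pvPrimeA (l : List Int) : List Bool :=
  l.foldl (fun res i => res ++ [pvCountA i == 1]) []

def adjacent_to_prime (l : List Int) : List Int :=
  let p := pvPrimeA l
  let mima :=
    (PySem.List.pyRange 0 (p.length : Int) 1).foldl
      (fun (mm : List Int × List Int) i =>
        if PySem.List.pyGetD p i false = true then
          ((if i > 0 then mm.1 ++ [i - 1] else mm.1), mm.2 ++ [i + 1])
        else mm)
      ([], [])
  let res :=
    (PySem.List.pyRange 0 (l.length : Int) 1).foldl
      (fun r i =>
        let r := if i ∈ mima.1 then r ++ [PySem.List.pyGetD l i 0] else r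
        if i ∈ mima.2 then r ++ [PySem.List.pyGetD l i 0] else r)
      []
  -- res1 = set(res); res = list(res1); res.sort(): sorting makes the set's hash order irrelevant
  PySem.List.sorted (PySem.Set.ofList res) (fun x => x) false

-- ===== PORT B =====
-- trial-division loop: `for j in range(2, n): if j*j > n: break; if n % j == 0: return False`
def pvTrialB (n : Int) : List Int → Bool
  | [] => true
  | j :: rest =>
      if j * j > n then true
      else if PySem.Int.mod n j = 0 then false
      else pvTrialB n rest

def pvIsPrimeB (n : Int) : Bool :=
  if n < 2 then false else pvTrialB n (PySem.List.pyRange 2 n 1)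

def adjacent_to_prime_alt (l : List Int) : List Int :=
  let vals :=
    (PySem.List.pyRange 0 (l.length : Int) 1).foldl
      (fun (s : PySem.Set Int) i =>
        if pvIsPrimeB (PySem.List.pyGetD l i 0) then
          let s := if i > 0 then PySem.Set.add s (PySem.List.pyGetD l (i - 1) 0) else s
          if i + 1 < (l.length : Int) then PySem.Set.add s (PySem.List.pyGetD l (i + 1) 0) else s
        else s)
      PySem.Set.empty
  PySem.List.sorted vals (fun x => x) false

-- ===== PRECONDITION & SPEC =====
def Spec_adjacent_to_prime (l : List Int) (out : List Int) : Prop := out = adjacent_to_prime_alt l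
instance (l : List Int) (out : List Int) : Decidable (Spec_adjacent_to_prime l out) := by unfold Spec_adjacent_to_prime; infer_instance

-- ===== CLAIM (what is proved, stated in full; the proofs are below) =====
def Claim_equal_adjacent_to_prime : Prop := ∀ (l : List Int), Dom_adjacent_to_prime l → Spec_adjacent_to_prime l (adjacent_to_prime l)

-- ===== LEMMAS AND PROOFS =====

-- generic fold lemmas
theorem foldl_app_singleton {α β : Type} (f : α → β) : ∀ (xs : List α) (acc : List β),
    xs.foldl (fun r i => r ++ [f i]) acc = acc ++ xs.map f := by
  intro xs; induction xs with
  | nil => simp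
  | cons a t ih => intro acc; simp [List.foldl_cons, ih]

theorem count_fold (P : Int → Prop) [DecidablePred P] : ∀ (xs : List Int) (c : Int),
    xs.foldl (fun c j => if P j then c + 1 else c) c = c + xs.countP (fun j => decide (P j)) := by
  intro xs; induction xs with
  | nil => simp
  | cons a t ih => intro c; by_cases h : P a <;> simp [List.foldl_cons, h, ih] <;> ring

-- A's primality count characterised
theorem pvCountA_eq_one_iff (n : Int) :
    (pvCountA n == 1) = true ↔ (2 ≤ n ∧ ∀ j : Int, 2 ≤ j → j < n → ¬ j ∣ n) := by
  unfold pvCountA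
  rcases lt_or_ge n 2 with h | h
  · rw [show PySem.List.pyRange 1 n 1 = [] from PySem.List.pyRange_one_eq_nil (by omega)]
    simp
    intro h1
    omega
  · rw [PySem.List.pyRange_one_cons (by omega)]
    rw [count_fold (fun j => PySem.Int.mod n j = 0)]
    have h1 : PySem.Int.mod n 1 = 0 := (PySem.Int.mod_eq_zero_iff_dvd n 1).mpr ⟨n, by ring⟩
    simp [PySem.Int.mod_eq_zero_iff_dvd]
    tauto

-- B's trial loop characterised
theorem pvTrialB_empty (n : Int) (a : Int) (ha : 2 ≤ a) (hna : n ≤ a) :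
    (pvTrialB n (PySem.List.pyRange a n 1) = true ↔ ∀ j : Int, a ≤ j → j * j ≤ n → ¬ j ∣ n) := by
  rw [PySem.List.pyRange_one_eq_nil hna]
  simp [pvTrialB]
  intro j hj hsq
  nlinarith

theorem pvTrialB_aux (n : Int) (_hn : 2 ≤ n) : ∀ (k : Nat) (a : Int), 2 ≤ a → n - a ≤ (k : Int) →
    (pvTrialB n (PySem.List.pyRange a n 1) = true ↔ ∀ j : Int, a ≤ j → j * j ≤ n → ¬ j ∣ n) := by
  intro k
  induction k with
  | zero => intro a ha hk; exact pvTrialB_empty n a ha (by omega)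
  | succ k ih =>
    intro a ha hk
    by_cases hna : n ≤ a
    · exact pvTrialB_empty n a ha hna
    · rw [PySem.List.pyRange_one_cons (by omega)]
      show (if a * a > n then true else if PySem.Int.mod n a = 0 then false else pvTrialB n (PySem.List.pyRange (a+1) n 1)) = true ↔ _
      split_ifs with hsq hdv
      · simp
        intro j hj hjj
        nlinarith
      · simp
        refine ⟨a, le_refl a, by omega, ?_⟩
        exact (PySem.Int.mod_eq_zero_iff_dvd n a).mp hdv
      · rw [ih (a+1) (by omega) (by omega)]
        constructor
        · intro hf j hj hjj hd
          rcases eq_or_lt_of_le hj with rfl | hlt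
          · exact hdv ((PySem.Int.mod_eq_zero_iff_dvd n a).mpr hd)
          · exact hf j (by omega) hjj hd
        · intro hf j hj hjj
          exact hf j (by omega) hjj

theorem pvTrialB_spec (n : Int) (hn : 2 ≤ n) (a : Int) (ha : 2 ≤ a) :
    (pvTrialB n (PySem.List.pyRange a n 1) = true ↔ ∀ j : Int, a ≤ j → j * j ≤ n → ¬ j ∣ n) :=
  pvTrialB_aux n hn (n - a).toNat a ha (by omega)

theorem sqrt_suffices (n : Int) (hn : 2 ≤ n)
    (h : ∀ j : Int, 2 ≤ j → j * j ≤ n → ¬ j ∣ n) :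
    ∀ j : Int, 2 ≤ j → j < n → ¬ j ∣ n := by
  rintro j h2 hlt ⟨k, hk⟩
  have hk1 : 1 ≤ k := by nlinarith
  have hk2 : 2 ≤ k := by
    rcases eq_or_lt_of_le hk1 with rfl | h'
    · omega
    · omega
  by_cases hjj : j * j ≤ n
  · exact h j h2 hjj ⟨k, hk⟩
  · have : k * k ≤ n := by nlinarith
    exact h k hk2 this ⟨j, by linarith [hk, mul_comm j k]⟩

theorem prime_tests_agree (n : Int) : (pvCountA n == 1) = pvIsPrimeB n := by
  rw [Bool.eq_iff_iff, pvCountA_eq_one_iff]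
  unfold pvIsPrimeB
  split_ifs with h
  · simp
    intro h2
    omega
  · rw [pvTrialB_spec n (by omega) 2 (le_refl 2)]
    constructor
    · rintro ⟨h2, hf⟩ j hj hjj hd
      rcases eq_or_lt_of_le (one_le_two.trans hj) with h1 | h1
      · exact absurd hd (by rw [← h1] at hd ⊢; intro hdd; nlinarith [Int.le_of_dvd (by omega) hd])
      · rcases lt_or_ge j n with hlt | hge
        · exact hf j hj hlt hd
        · nlinarith
    · intro hf
      exact ⟨by omega, sqrt_suffices n (by omega) hf⟩

-- mi/ma fold membership
theorem mem_mima_fold (g : Int → Bool) :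
    ∀ (xs : List Int) (acc : List Int × List Int) (x : Int),
      (x ∈ (xs.foldl (fun (mm : List Int × List Int) i =>
          if g i = true then ((if i > 0 then mm.1 ++ [i - 1] else mm.1), mm.2 ++ [i + 1]) else mm) acc).1 ↔
        x ∈ acc.1 ∨ ∃ i ∈ xs, g i = true ∧ 0 < i ∧ x = i - 1) ∧
      (x ∈ (xs.foldl (fun (mm : List Int × List Int) i =>
          if g i = true then ((if i > 0 then mm.1 ++ [i - 1] else mm.1), mm.2 ++ [i + 1]) else mm) acc).2 ↔
        x ∈ acc.2 ∨ ∃ i ∈ xs, g i = true ∧ x = i + 1) := by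
  intro xs
  induction xs with
  | nil => intro acc x; simp
  | cons a t ih =>
    intro acc x
    simp only [List.foldl_cons]
    constructor
    · rw [(ih _ x).1]
      by_cases hg : g a = true <;> by_cases hp : a > 0 <;> simp [hg, hp] <;> aesop
    · rw [(ih _ x).2]
      by_cases hg : g a = true <;> simp [hg] <;> aesop

-- res fold membership
theorem mem_res_fold (mi ma : List Int) (h : Int → Int) :
    ∀ (xs : List Int) (acc : List Int) (x : Int),
      x ∈ xs.foldl (fun r i =>
          let r' := if i ∈ mi then r ++ [h i] else r
          if i ∈ ma then r' ++ [h i] else r') acc ↔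
        x ∈ acc ∨ ∃ i ∈ xs, (i ∈ mi ∨ i ∈ ma) ∧ x = h i := by
  intro xs
  induction xs with
  | nil => simp
  | cons a t ih =>
    intro acc x
    simp only [List.foldl_cons]
    by_cases h1 : a ∈ mi <;> by_cases h2 : a ∈ ma <;>
      simp only [h1, h2, if_true, if_false] <;>
      rw [ih] <;> simp [h1, h2] <;> aesop

-- vals fold membership and nodup
theorem mem_vals_fold (c : Int → Bool) (u v : Int → Int) (L : Int) :
    ∀ (xs : List Int) (s : PySem.Set Int) (x : Int),
      x ∈ xs.foldl (fun (s : PySem.Set Int) i =>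
          if c i = true then
            let s' := if i > 0 then PySem.Set.add s (u i) else s
            if i + 1 < L then PySem.Set.add s' (v i) else s'
          else s) s ↔
        x ∈ s ∨ ∃ i ∈ xs, c i = true ∧ ((0 < i ∧ x = u i) ∨ (i + 1 < L ∧ x = v i)) := by
  intro xs
  induction xs with
  | nil => simp
  | cons a t ih =>
    intro s x
    simp only [List.foldl_cons]
    by_cases h1 : c a = true <;> by_cases h2 : a > 0 <;> by_cases h3 : a + 1 < L <;>
      simp only [h1, h2, h3, if_true, if_false] <;>
      rw [ih] <;> simp [h1, h2, h3, PySem.Set.mem_add] <;> aesop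

theorem nodup_vals_fold (c : Int → Bool) (u v : Int → Int) (L : Int) :
    ∀ (xs : List Int) (s : PySem.Set Int), s.Nodup →
      (xs.foldl (fun (s : PySem.Set Int) i =>
          if c i = true then
            let s' := if i > 0 then PySem.Set.add s (u i) else s
            if i + 1 < L then PySem.Set.add s' (v i) else s'
          else s) s).Nodup := by
  intro xs
  induction xs with
  | nil => intro s hs; simpa
  | cons a t ih =>
    intro s hs
    simp only [List.foldl_cons]
    apply ih
    split_ifs <;> simp [PySem.Set.nodup_add, hs]

theorem pvPrimeA_eq_map (l : List Int) : pvPrimeA l = l.map pvIsPrimeB := by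
  unfold pvPrimeA
  rw [foldl_app_singleton]
  simp only [List.nil_append]
  exact List.map_congr_left (fun i _ => prime_tests_agree i)

theorem main_eq (l : List Int) : adjacent_to_prime l = adjacent_to_prime_alt l := by
  simp only [adjacent_to_prime, adjacent_to_prime_alt]
  have hp : pvPrimeA l = l.map pvIsPrimeB := pvPrimeA_eq_map l
  have hlen : (pvPrimeA l).length = l.length := by rw [hp]; simp
  have hg : ∀ t : Int,
      PySem.List.pyGetD (pvPrimeA l) t false = pvIsPrimeB (PySem.List.pyGetD l t 0) := by
    intro t
    rw [hp, show (false : Bool) = pvIsPrimeB 0 from rfl, PySem.List.pyGetD_map]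
  apply PySem.List.sorted_eq_sorted_of_perm _ _ _ (fun a b h => h)
  apply (List.perm_ext_iff_of_nodup (PySem.Set.nodup_ofList _) ?_).mpr
  swap
  · exact nodup_vals_fold _ _ _ _ _ _ List.nodup_nil
  intro x
  rw [PySem.Set.mem_ofList,
      mem_res_fold _ _ _ _ _ x,
      mem_vals_fold (fun i => pvIsPrimeB (PySem.List.pyGetD l i 0))
        (fun i => PySem.List.pyGetD l (i - 1) 0) (fun i => PySem.List.pyGetD l (i + 1) 0)
        (l.length : Int) _ _ x]
  simp only [List.not_mem_nil, false_or]
  rw [hlen]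
  have hset : (x ∈ PySem.Set.empty) ↔ False := by simp [PySem.Set.empty]
  rw [hset, false_or]
  constructor
  · rintro ⟨i, hi, hmima, rfl⟩
    rw [PySem.List.mem_pyRange_one] at hi
    rcases hmima with hmi | hma
    · obtain ⟨t, ht, hgt, hpos, rfl⟩ := by
        have := ((mem_mima_fold (fun i => PySem.List.pyGetD (pvPrimeA l) i false)
          (PySem.List.pyRange 0 (l.length : Int) 1) ([], []) _).1).mp hmi
        simpa using this
      exact ⟨t, PySem.List.mem_pyRange_one.mpr (by omega), by rw [← hg t]; exact hgt,
        Or.inl ⟨hpos, rfl⟩⟩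
    · obtain ⟨t, ht, hgt, rfl⟩ := by
        have := ((mem_mima_fold (fun i => PySem.List.pyGetD (pvPrimeA l) i false)
          (PySem.List.pyRange 0 (l.length : Int) 1) ([], []) _).2).mp hma
        simpa using this
      exact ⟨t, PySem.List.mem_pyRange_one.mpr (by omega), by rw [← hg t]; exact hgt,
        Or.inr ⟨by omega, rfl⟩⟩
  · rintro ⟨i, hi, hprime, hcase⟩
    rw [PySem.List.mem_pyRange_one] at hi
    rcases hcase with ⟨hpos, rfl⟩ | ⟨hlt, rfl⟩
    · refine ⟨i - 1, PySem.List.mem_pyRange_one.mpr (by omega), Or.inl ?_, rfl⟩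
      apply ((mem_mima_fold (fun i => PySem.List.pyGetD (pvPrimeA l) i false)
        (PySem.List.pyRange 0 (l.length : Int) 1) ([], []) _).1).mpr
      exact Or.inr ⟨i, PySem.List.mem_pyRange_one.mpr (by omega), by rw [hg i]; exact hprime,
        hpos, rfl⟩
    · refine ⟨i + 1, PySem.List.mem_pyRange_one.mpr (by omega), Or.inr ?_, rfl⟩
      apply ((mem_mima_fold (fun i => PySem.List.pyGetD (pvPrimeA l) i false)
        (PySem.List.pyRange 0 (l.length : Int) 1) ([], []) _).2).mpr
      exact Or.inr ⟨i, PySem.List.mem_pyRange_one.mpr (by omega), by rw [hg i]; exact hprime, rfl⟩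

-- ===== VERDICT (by name: the statement is the Claim_ definition above) =====
theorem adjacent_to_prime_spec : Claim_equal_adjacent_to_prime := by
  intro l _
  exact main_eq l
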